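-- pv_equiv track=rewrite | github.com/anroMK/codewars-python | 6kyu/hollow_array.py | is_hollow
-- ===== SOURCE A (Python) =====
-- def is_hollow(x):
--     if len(x) < 3:
--         return False
--     if not 0 in x:
--         return False
--     if x.count(0) == len(x):
--         return True
--     if x.count(0) < 3:
--         return False
--     index = x.index(0)
--     for i in x[index:-index]:
--         if i != 0:
--             return False
--     if 0 in x[:index] or 0 in x[-index:]:
--         return False
--     return True
-- ===== SOURCE B (Python) =====
-- def is_hollow(x):
--     n = len(x)
--     if n < 3:
--         return False
--     zeros = sum(1 for v in x if v == 0)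
--     if zeros == 0:
--         return False
--     if zeros == n:
--         return True
--     if zeros < 3:
--         return False
--     L = 0
--     while x[L] != 0:
--         L += 1
--     T = 0
--     while x[n - 1 - T] != 0:
--         T += 1
--     return L >= 1 and L == T and n - zeros == 2 * L
-- ===== Notes on version B (the rewrite author's own statement) =====
-- stated objective: alternative
-- what changed: A verifies hollowness with repeated count/index calls and two slice scans around the first zero; B makes one counting pass for zeros, measures the leading and trailing nonzero runs with two end-walks, and decides by the arithmetic check L>=1, L==T and nonzeros==2L.
import Mathlib
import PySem

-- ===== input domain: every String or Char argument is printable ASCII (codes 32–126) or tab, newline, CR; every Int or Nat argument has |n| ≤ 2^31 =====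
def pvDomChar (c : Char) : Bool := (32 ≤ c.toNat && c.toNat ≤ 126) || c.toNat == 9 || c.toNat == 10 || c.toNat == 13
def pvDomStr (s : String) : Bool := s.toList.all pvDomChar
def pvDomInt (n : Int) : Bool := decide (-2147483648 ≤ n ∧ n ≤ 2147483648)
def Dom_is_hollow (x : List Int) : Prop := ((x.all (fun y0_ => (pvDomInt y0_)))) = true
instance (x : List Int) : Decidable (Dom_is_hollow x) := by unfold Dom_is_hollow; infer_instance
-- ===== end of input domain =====

-- B replaces A's index/slice scans by one zero count plus two end-run walks and an
-- arithmetic symmetry check (objective: alternative algorithm; no speed claim).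

-- ===== PORT A =====
def is_hollow (x : List Int) : Bool :=
  if x.length < 3 then false
  else if ¬ ((0:Int) ∈ x) then false
  else if PySem.List.count x 0 = x.length then true
  else if PySem.List.count x 0 < 3 then false
  else
    match PySem.List.index? x 0 with
    | none => false   -- unreachable: 0 ∈ x
    | some idx =>
      if (PySem.List.slice x (some (idx : Int)) (some (-(idx : Int)))).any (fun i => i ≠ 0)
      then false
      else if (0:Int) ∈ PySem.List.slice x none (some (idx : Int))
              ∨ (0:Int) ∈ PySem.List.slice x (some (-(idx : Int))) none
      then false
      else true

-- ===== PORT B =====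
-- leadRun: length of the leading run of nonzero elements ('while x[k] != 0: k += 1')
def leadRun : List Int → Nat
  | [] => 0
  | a :: t => if a = 0 then 0 else leadRun t + 1

def is_hollow_alt (x : List Int) : Bool :=
  let n := x.length
  if n < 3 then false
  else
    let zeros := x.countP (fun v => v == 0)
    if zeros = 0 then false
    else if zeros = n then true
    else if zeros < 3 then false
    else
      let L := leadRun x
      let T := leadRun x.reverse
      decide (1 ≤ L) && decide (L = T) && decide (n - zeros = 2 * L)


-- ===== PRECONDITION & SPEC =====
def Spec_is_hollow (x : List Int) (out : Bool) : Prop := out = is_hollow_alt x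
instance (x : List Int) (out : Bool) : Decidable (Spec_is_hollow x out) := by unfold Spec_is_hollow; infer_instance

-- ===== CLAIM (what is proved, stated in full; the proofs are below) =====
def Claim_equal_is_hollow : Prop := ∀ (x : List Int), Dom_is_hollow x → Spec_is_hollow x (is_hollow x)

-- ===== LEMMAS AND PROOFS =====


theorem take_leadRun_ne_zero (xs : List Int) : ∀ i ∈ xs.take (leadRun xs), i ≠ 0 := by
  induction xs with
  | nil => simp
  | cons a t ih =>
      by_cases h : a = 0
      · simp [leadRun, h]
      · simp only [leadRun, if_neg h, List.take_succ_cons, List.mem_cons]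
        rintro i (rfl | hi)
        · exact h
        · exact ih i hi

theorem leadRun_append_of_not_mem (a b : List Int) (h : (0:Int) ∉ a) :
    leadRun (a ++ b) = a.length + leadRun b := by
  induction a with
  | nil => simp
  | cons x t ih =>
      have hx : x ≠ 0 := fun hh => h (by simp [hh])
      have ht : (0:Int) ∉ t := fun hh => h (by simp [hh])
      simp [leadRun, hx, ih ht]
      omega

theorem core_iff (R : List Int) (L : Nat) (hL : 1 ≤ L) (hLm : L ≤ R.length)
    (h0 : (0:Int) ∈ R) :
    ((∀ i ∈ R.take (R.length - L), i = 0) ∧ (0:Int) ∉ R.drop (R.length - L)) ↔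
    (L = leadRun R.reverse ∧ R.length - R.count 0 = L) := by
  have hsplit : R.take (R.length - L) ++ R.drop (R.length - L) = R := List.take_append_drop _ _
  have hlt : (R.take (R.length - L)).length = R.length - L := by
    simp [List.length_take]
  have hld : (R.drop (R.length - L)).length = L := by
    simp [List.length_drop]; omega
  constructor
  · rintro ⟨hall, hnd⟩
    have hmem_take : (0:Int) ∈ R.take (R.length - L) := by
      have h0' : (0:Int) ∈ R.take (R.length - L) ++ R.drop (R.length - L) := by
        rw [hsplit]; exact h0
      rcases List.mem_append.mp h0' with h | h
      · exact h
      · exact absurd h hnd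
    have hcount_take : (R.take (R.length - L)).count 0 = R.length - L := by
      have h1 : List.count 0 (R.take (R.length - L)) = (R.take (R.length - L)).length :=
        List.count_eq_length.mpr (fun b hb => (hall b hb).symm)
      rw [h1, hlt]
    have hcount_drop : (R.drop (R.length - L)).count 0 = 0 :=
      List.count_eq_zero.mpr hnd
    have hc : R.count 0 = R.length - L := by
      conv_lhs => rw [← hsplit]
      rw [List.count_append, hcount_take, hcount_drop]
      omega
    constructor
    · -- leadRun of reverse
      have hrev : R.reverse = (R.drop (R.length - L)).reverse ++ (R.take (R.length - L)).reverse := by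
        rw [← List.reverse_append, hsplit]
      rw [hrev, leadRun_append_of_not_mem _ _ (by simpa using hnd)]
      have : leadRun (R.take (R.length - L)).reverse = 0 := by
        rcases hrev2 : (R.take (R.length - L)).reverse with _ | ⟨a, t⟩
        · exfalso
          have := List.reverse_eq_nil_iff.mp hrev2
          rw [this] at hmem_take; simp at hmem_take
        · have ha : a ∈ R.take (R.length - L) := by
            have : a ∈ (R.take (R.length - L)).reverse := by rw [hrev2]; simp
            simpa using this
          have := hall a ha
          simp [leadRun, this]
      rw [this]
      simp [hld]
    · omega
  · rintro ⟨hT, hc⟩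
    have hcle : R.count 0 ≤ R.length := List.count_le_length
    have hc' : R.count 0 = R.length - L := by omega
    have hnd : (0:Int) ∉ R.drop (R.length - L) := by
      intro hmem
      have hne := take_leadRun_ne_zero R.reverse
      rw [← hT] at hne
      have : R.drop (R.length - L) = (R.reverse.take L).reverse := by
        rw [List.take_reverse, List.reverse_reverse]
      rw [this] at hmem
      have h0' : (0:Int) ∈ R.reverse.take L := by simpa using hmem
      exact hne 0 h0' rfl
    have hcount_drop : (R.drop (R.length - L)).count 0 = 0 :=
      List.count_eq_zero.mpr hnd
    have hcount_take : (R.take (R.length - L)).count 0 = R.length - L := by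
      have : R.count 0 = (R.take (R.length - L)).count 0 + (R.drop (R.length - L)).count 0 := by
        conv_lhs => rw [← hsplit]
        rw [List.count_append]
      omega
    refine ⟨fun i hi => ?_, hnd⟩
    have := List.count_eq_length.mp (by rw [hcount_take, hlt])
    exact (this i hi).symm

theorem leadRun_le_length (xs : List Int) : leadRun xs ≤ xs.length := by
  induction xs with
  | nil => simp [leadRun]
  | cons a t ih => by_cases h : a = 0 <;> simp [leadRun, h] <;> omega

theorem drop_leadRun_eq (xs : List Int) (hx : (0:Int) ∈ xs) :
    ∃ t, xs.drop (leadRun xs) = 0 :: t := by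
  induction xs with
  | nil => simp at hx
  | cons a t ih =>
      by_cases h : a = 0
      · subst h; exact ⟨t, by simp [leadRun]⟩
      · have hx' : (0:Int) ∈ t := by
          rcases List.mem_cons.mp hx with h0 | h0
          · exact absurd h0.symm h
          · exact h0
        simpa [leadRun, h] using ih hx'

theorem index?_eq_leadRun (xs : List Int) (hx : (0:Int) ∈ xs) :
    PySem.List.index? xs 0 = some (leadRun xs) := by
  induction xs with
  | nil => simp at hx
  | cons a t ih =>
      by_cases h : a = 0
      · subst h
        rw [PySem.List.index?_cons_self]
        simp [leadRun]
      · have hx' : (0:Int) ∈ t := by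
          rcases List.mem_cons.mp hx with h0 | h0
          · exact absurd h0.symm h
          · exact h0
        rw [PySem.List.index?_cons_of_ne _ h, ih hx']
        simp [leadRun, h]

theorem leadRun_append_of_mem (a b : List Int) (h : (0:Int) ∈ a) :
    leadRun (a ++ b) = leadRun a := by
  induction a with
  | nil => simp at h
  | cons x t ih =>
      by_cases hx : x = 0
      · simp [leadRun, hx]
      · have h' : (0:Int) ∈ t := by
          rcases List.mem_cons.mp h with h0 | h0
          · exact absurd h0.symm hx
          · exact h0
        simp [leadRun, hx, ih h']

theorem slice_pos_neg (xs : List Int) (k : Nat) (h : 0 < k) :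
    PySem.List.slice xs (some (k:Int)) (some (-(k:Int))) = (xs.drop k).take (xs.length - k - k) := by
  simp only [PySem.List.slice, PySem.List.clampIdx]
  by_cases hle : k ≤ xs.length
  case pos =>
    have h2 : ¬ xs.length < k := by omega
    have h3 : ¬ ((k:Int) < 0) := by omega
    have h4 : ((xs.length : Int) + -(k:Int)).toNat = xs.length - k := by omega
    simp [h, h2, h3, h4, min_eq_left hle]
  case neg =>
    have hlt : xs.length < k := by omega
    have h4 : xs.length - k = 0 := by omega
    have h3 : ¬ ((k:Int) < 0) := by omega
    simp [h, hlt, h3, h4, min_eq_right (le_of_lt hlt)]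

theorem arith1 (n m L c : Nat) (hn : n = L + m) (hml : m < L) (hc : c ≤ m) :
    ¬ (n - c = 2 * L) := by omega

theorem arith2 (n m L c : Nat) (hn : n = L + m) :
    (n - c = 2 * L ↔ m - c = L) := by omega

theorem arith3 (n L : Nat) (h2 : n - L < L) :
    n - L + (L - (n - L)) = L := by omega

theorem arith4 (n L : Nat) (h : L ≤ n - L) : n - L = L + (n - L - L) := by omega

theorem main_eq (x : List Int) : is_hollow x = is_hollow_alt x := by
  unfold is_hollow is_hollow_alt
  have hzc : x.countP (fun v => v == 0) = x.count 0 := rfl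
  simp only [PySem.List.count_eq, hzc]
  by_cases h3 : x.length < 3
  · simp [h3]
  · simp only [if_neg h3]
    by_cases hmem : (0:Int) ∈ x
    case neg =>
      have hc0 : x.count 0 = 0 := List.count_eq_zero.mpr hmem
      simp [hmem, hc0]
    case pos =>
      have hcpos : 0 < x.count 0 := List.count_pos_iff.mpr hmem
      rw [if_neg (by simpa using hmem), if_neg (by omega : ¬ x.count 0 = 0)]
      by_cases hcn : x.count 0 = x.length
      · simp [hcn]
      · simp only [if_neg hcn]
        by_cases hc3 : x.count 0 < 3
        · simp [hc3]
        · simp only [if_neg hc3]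
          rw [index?_eq_leadRun x hmem]
          dsimp only
          obtain ⟨t, hdrop⟩ := drop_leadRun_eq x hmem
          by_cases hL0 : leadRun x = 0
          · rw [hL0]
            simp [PySem.List.slice_none_none, hmem,
              PySem.List.slice_to x (by norm_num : (0:Int) ≤ 0)]
          · have hL1 : 1 ≤ leadRun x := by omega
            set L := leadRun x with hLdef
            have hLlen : L ≤ x.length := leadRun_le_length x
            set R := x.drop L with hRdef
            have hRlen : R.length = x.length - L := by simp [hRdef]
            have hn : x.length = L + R.length := by
              have : R = 0 :: t := hdrop
              have : 0 < R.length := by rw [this]; simp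
              omega
            have hmemR : (0:Int) ∈ R := by rw [hdrop]; simp
            have hsplitx : x.take L ++ R = x := List.take_append_drop _ _
            have hPne : ∀ i ∈ x.take L, i ≠ 0 := take_leadRun_ne_zero x
            have hPmem : (0:Int) ∉ x.take L := fun hh => hPne 0 hh rfl
            have hcR : x.count 0 = R.count 0 := by
              conv_lhs => rw [← hsplitx]
              rw [List.count_append, List.count_eq_zero.mpr hPmem]
              omega
            have hT : leadRun x.reverse = leadRun R.reverse := by
              conv_lhs => rw [← hsplitx]
              rw [List.reverse_append]
              exact leadRun_append_of_mem _ _ (by simpa using hmemR)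
            rw [slice_pos_neg x L hL1, PySem.List.slice_to_natCast,
              PySem.List.slice_from_neg_natCast x (k := L) hL1]
            by_cases hml : R.length < L
            · -- degenerate: fewer than L trailing slots; both sides are false
              have hmemdrop : (0:Int) ∈ x.drop (x.length - L) := by
                have h1 : (0:Int) ∈ List.drop (L - (x.length - L)) (List.drop (x.length - L) x) := by
                  rw [List.drop_drop]
                  rw [arith3 x.length L (hRlen ▸ hml), ← hRdef, hdrop]
                  simp
                exact List.mem_of_mem_drop h1
              have hcle : R.count 0 ≤ R.length := List.count_le_length
              have harith : ¬ (x.length - x.count 0 = 2 * L) := by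
                rw [hcR]
                exact arith1 x.length R.length L _ hn hml List.count_le_length
              simp [hmemdrop, harith]
            · have hml' : L ≤ R.length := Nat.le_of_not_lt hml
              have htake : (x.drop L).take (x.length - L - L) = R.take (R.length - L) := by
                rw [← hRdef]
                congr 1
                omega
              have hdropd : x.drop (x.length - L) = R.drop (R.length - L) := by
                rw [hRdef, List.drop_drop]
                congr 1
                rw [List.length_drop]
                exact arith4 x.length L (hRlen ▸ hml')
              rw [htake, hdropd]
              have hiff := core_iff R L hL1 hml' hmemR
              rw [Bool.eq_iff_iff]
              simp only [Bool.if_false_left, Bool.if_true_right, Bool.and_eq_true,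
                Bool.not_eq_true', decide_eq_true_eq,
                decide_eq_false_iff_not, hPmem, false_or]
              have harith2 : x.length - List.count 0 x = 2 * L ↔ R.length - List.count 0 R = L := by
                rw [hcR]
                exact arith2 x.length R.length L _ hn
              constructor
              · rintro ⟨hall, hnd⟩
                have hall' : ∀ i ∈ R.take (R.length - L), i = 0 := by
                  intro i hi
                  by_contra hne
                  exact hall (List.any_eq_true.mpr ⟨i, hi, by simpa using hne⟩)
                have hnd' : (0:Int) ∉ R.drop (R.length - L) := by simpa using hnd
                have hcore := hiff.mp ⟨hall', hnd'⟩
                exact ⟨⟨hL1, by rw [hT, ← hcore.1]⟩, harith2.mpr hcore.2⟩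
              · rintro ⟨⟨-, hTeq⟩, harith⟩
                have hcore := hiff.mpr ⟨by rw [hT] at hTeq; exact hTeq, harith2.mp harith⟩
                constructor
                · intro hany
                  rcases List.any_eq_true.mp hany with ⟨i, hi, hd⟩
                  exact (by simpa using hd : i ≠ 0) (hcore.1 i hi)
                · simp [hcore.2]

-- ===== VERDICT (by name: the statement is the Claim_ definition above) =====
theorem is_hollow_spec : Claim_equal_is_hollow := fun x _ => main_eq x
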